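-- pv_equiv track=rewrite | github.com/pabloschwarzenberg/grader | hito1_ej11/hito1_ej11_3b64a46edacd278ceee36c63958c8ebb.py | CalculoBilletes
-- ===== SOURCE A (Python) =====
-- def CalculoBilletes (mR) :
-- 	b20 = [20000]
-- 	b10 = [10000]
-- 	b5 = [5000]
-- 	total = []
--
-- 	cb20 = 20
-- 	cb10 = 40
-- 	cb5 = 40
--
-- 	b20a = b20 * cb20
-- 	b10a = b10 * cb10
-- 	b5a = b5 * cb5
--
-- 	contador20 = 0
-- 	contador10 = 0
-- 	contador5 = 0
--
-- 	suma = 0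
--
-- 	while(len(b20a) > 0 and mR >= 20000):
-- 		mR = mR - 20000
-- 		total = total + b20
-- 		contador20 += 1
-- 		b20a.remove(20000)
--
-- 	while(len(b10a) > 0 and mR >= 10000):
-- 		mR = mR - 10000
-- 		total = total + b10
-- 		contador10 += 1
-- 		b10a.remove(10000)
--
-- 	while(len(b5a) > 0 and mR >= 5000):
-- 		mR = mR - 20000
-- 		total = total + b5
-- 		contador5 += 1
-- 		b5a.remove(5000)
--
-- 	for i in total :
-- 		suma = suma + i
--
-- 	return(suma,contador20,contador10,contador5)
-- ===== SOURCE B (Python) =====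
-- def CalculoBilletes(mR):
--     # Greedy change-making with a bounded supply of each bill:
--     # 20 x $20000, 40 x $10000, 40 x $5000.
--     c20 = max(0, min(20, mR // 20000))
--     mR -= 20000 * c20
--     c10 = max(0, min(40, mR // 10000))
--     mR -= 10000 * c10
--     c5 = max(0, min(40, mR // 5000))
--     return (20000 * c20 + 10000 * c10 + 5000 * c5, c20, c10, c5)
-- ===== Notes on version B (the rewrite author's own statement) =====
-- stated objective: simpler
-- what changed: Replaces the three bill-by-bill while-loops over replicated lists and the summation loop with closed-form floor-division counts of each denomination.
-- intended difference: For 810000 <= mR < 1585000 A undercounts 5000-bills because its third loop subtracts 20000 instead of 5000 per bill (e.g. A(810000)=(805000,20,40,1)); B returns the correct greedy count ((810000,20,40,2)), which is the intended dispensing. — e.g. on CalculoBilletes(810000): A returns (805000, 20, 40, 1), B returns (810000, 20, 40, 2)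
import Mathlib
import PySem

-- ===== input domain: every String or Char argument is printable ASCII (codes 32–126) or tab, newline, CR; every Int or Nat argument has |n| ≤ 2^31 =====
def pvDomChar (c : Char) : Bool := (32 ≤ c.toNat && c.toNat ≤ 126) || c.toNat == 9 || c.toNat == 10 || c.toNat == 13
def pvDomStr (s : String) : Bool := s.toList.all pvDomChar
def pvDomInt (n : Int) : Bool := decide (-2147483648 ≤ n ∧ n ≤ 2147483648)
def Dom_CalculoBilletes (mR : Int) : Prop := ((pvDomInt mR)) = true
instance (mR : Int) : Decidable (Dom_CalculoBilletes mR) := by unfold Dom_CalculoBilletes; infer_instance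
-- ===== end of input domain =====

-- B replaces A's three bill-by-bill while-loops and the summation loop with closed-form
-- floor-division counts (simpler); A's third loop subtracts 20000 per 5000-bill, so on one
-- interval (stated in D_ below) B's correct greedy count intentionally differs from A's.

-- ===== PORT A =====
-- the common shape of A's three while-loops:
--   while(len(lst) > 0 and mR >= thr): mR -= dec; total += [bill]; c += 1; lst.remove(bill)
-- lst always consists solely of copies of bill, so lst.remove(bill) removes the head.
def pvWhileA (thr dec bill : Int) : List Int → Int → List Int → Int → Int × List Int × Int
  | [], mR, total, c => (mR, total, c)
  | _ :: rest, mR, total, c =>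
    if mR ≥ thr then pvWhileA thr dec bill rest (mR - dec) (total ++ [bill]) (c + 1)
    else (mR, total, c)

def CalculoBilletes (mR : Int) : Int × Int × Int × Int :=
  -- b20a = [20000]*20, b10a = [10000]*40, b5a = [5000]*40
  let b20a : List Int := List.replicate 20 20000
  let b10a : List Int := List.replicate 40 10000
  let b5a : List Int := List.replicate 40 5000
  let r1 := pvWhileA 20000 20000 20000 b20a mR [] 0
  let r2 := pvWhileA 10000 10000 10000 b10a r1.1 r1.2.1 0
  let r3 := pvWhileA 5000 20000 5000 b5a r2.1 r2.2.1 0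
  let suma := r3.2.1.foldl (· + ·) 0
  (suma, r1.2.2, r2.2.2, r3.2.2)

-- ===== PORT B =====
def CalculoBilletes_alt (mR : Int) : Int × Int × Int × Int :=
  let c20 := max 0 (min 20 (PySem.Int.floordiv mR 20000))
  let m1 := mR - 20000 * c20
  let c10 := max 0 (min 40 (PySem.Int.floordiv m1 10000))
  let m2 := m1 - 10000 * c10
  let c5 := max 0 (min 40 (PySem.Int.floordiv m2 5000))
  (20000 * c20 + 10000 * c10 + 5000 * c5, c20, c10, c5)

-- ===== PRECONDITION & SPEC =====
-- For 810000 ≤ mR < 1585000 A undercounts 5000-bills (its third loop subtracts 20000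
-- instead of 5000 per bill), e.g. A(810000) = (805000,20,40,1); B returns the correct
-- greedy count (810000,20,40,2), which is the intended dispensing.
def D_CalculoBilletes (mR : Int) : Prop := 810000 ≤ mR ∧ mR < 1585000
instance (mR : Int) : Decidable (D_CalculoBilletes mR) := by unfold D_CalculoBilletes; infer_instance

def Spec_CalculoBilletes (mR : Int) (out : Int × Int × Int × Int) : Prop := ¬ D_CalculoBilletes mR → out = CalculoBilletes_alt mR
instance (mR : Int) (out : Int × Int × Int × Int) : Decidable (Spec_CalculoBilletes mR out) := by unfold Spec_CalculoBilletes; infer_instance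

def pvDiffWitness_CalculoBilletes : Int := 810000
def pvDiffWitnessOut_CalculoBilletes : (Int × Int × Int × Int) × (Int × Int × Int × Int) :=
  ((805000, 20, 40, 1), (810000, 20, 40, 2))

-- ===== CLAIM (what is proved, stated in full; the proofs are below) =====
def Claim_unchanged_CalculoBilletes : Prop := ∀ (mR : Int), Dom_CalculoBilletes mR → Spec_CalculoBilletes mR (CalculoBilletes mR)
def Claim_changed_CalculoBilletes : Prop := Dom_CalculoBilletes (pvDiffWitness_CalculoBilletes) ∧ D_CalculoBilletes (pvDiffWitness_CalculoBilletes) ∧ CalculoBilletes (pvDiffWitness_CalculoBilletes) = pvDiffWitnessOut_CalculoBilletes.1 ∧ CalculoBilletes_alt (pvDiffWitness_CalculoBilletes) = pvDiffWitnessOut_CalculoBilletes.2 ∧ pvDiffWitnessOut_CalculoBilletes.1 ≠ pvDiffWitnessOut_CalculoBilletes.2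
def Claim_exact_CalculoBilletes : Prop := ∀ (mR : Int), Dom_CalculoBilletes mR → D_CalculoBilletes mR → CalculoBilletes mR ≠ CalculoBilletes_alt mR

-- ===== LEMMAS AND PROOFS =====

-- number of iterations pvWhileA performs on a list of n bills
def pvIter (thr dec : Int) (n : Nat) (mR : Int) : Nat :=
  if mR < thr then 0 else min n ((mR - thr) / dec + 1).toNat

lemma pvWhileA_spec (thr dec bill : Int) (hd : 0 < dec) (n : Nat) :
    ∀ (mR : Int) (total : List Int) (c : Int),
    pvWhileA thr dec bill (List.replicate n bill) mR total c =
      (mR - dec * pvIter thr dec n mR,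
       total ++ List.replicate (pvIter thr dec n mR) bill,
       c + pvIter thr dec n mR) := by
  induction n with
  | zero =>
    intro mR total c
    have : pvIter thr dec 0 mR = 0 := by unfold pvIter; split_ifs <;> omega
    simp [pvWhileA, this]
  | succ n ih =>
    intro mR total c
    rw [List.replicate_succ]
    by_cases h : mR ≥ thr
    · rw [show pvWhileA thr dec bill (bill :: List.replicate n bill) mR total c
            = pvWhileA thr dec bill (List.replicate n bill) (mR - dec) (total ++ [bill]) (c + 1)
          from by simp [pvWhileA, h]]
      rw [ih]
      have hstep : pvIter thr dec (n + 1) mR = pvIter thr dec n (mR - dec) + 1 := by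
        unfold pvIter
        by_cases h2 : mR - dec < thr
        · have h0 : (mR - thr) / dec = 0 :=
            Int.ediv_eq_zero_of_lt (by omega) (by omega)
          simp only [if_neg (by omega : ¬ mR < thr), if_pos h2, h0]
          omega
        · have hq : (mR - thr) / dec = (mR - dec - thr) / dec + 1 := by
            have := Int.add_mul_ediv_right (mR - dec - thr) 1 (by omega : dec ≠ 0)
            have he : mR - thr = mR - dec - thr + 1 * dec := by ring
            rw [he, this]
          have hq0 : 0 ≤ (mR - dec - thr) / dec := Int.ediv_nonneg (by omega) (by omega)
          simp only [if_neg (by omega : ¬ mR < thr), if_neg h2, hq]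
          omega
      rw [hstep]
      refine Prod.ext ?_ (Prod.ext ?_ ?_) <;> simp [List.replicate_succ]
      · ring
      · ring
    · have : pvIter thr dec (n + 1) mR = 0 := by unfold pvIter; split_ifs <;> omega
      simp [pvWhileA, h, this]

lemma foldl_add_replicate (n : Nat) (x : Int) :
    ∀ a : Int, (List.replicate n x).foldl (· + ·) a = a + n * x := by
  induction n with
  | zero => intro a; simp
  | succ n ih =>
    intro a
    rw [List.replicate_succ, List.foldl_cons, ih]
    push_cast; ring

-- closed form of A's result
lemma A_closed (mR : Int) : CalculoBilletes mR =
    (20000 * max 0 (min 20 (mR / 20000))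
       + 10000 * max 0 (min 40 ((mR - 20000 * max 0 (min 20 (mR / 20000))) / 10000))
       + 5000 * (if mR - 20000 * max 0 (min 20 (mR / 20000))
            - 10000 * max 0 (min 40 ((mR - 20000 * max 0 (min 20 (mR / 20000))) / 10000)) < 5000 then (0:Int)
          else min 40 ((mR - 20000 * max 0 (min 20 (mR / 20000))
            - 10000 * max 0 (min 40 ((mR - 20000 * max 0 (min 20 (mR / 20000))) / 10000)) - 5000) / 20000 + 1)),
     max 0 (min 20 (mR / 20000)),
     max 0 (min 40 ((mR - 20000 * max 0 (min 20 (mR / 20000))) / 10000)),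
     (if mR - 20000 * max 0 (min 20 (mR / 20000))
          - 10000 * max 0 (min 40 ((mR - 20000 * max 0 (min 20 (mR / 20000))) / 10000)) < 5000 then (0:Int)
        else min 40 ((mR - 20000 * max 0 (min 20 (mR / 20000))
          - 10000 * max 0 (min 40 ((mR - 20000 * max 0 (min 20 (mR / 20000))) / 10000)) - 5000) / 20000 + 1))) := by
  simp only [CalculoBilletes]
  rw [pvWhileA_spec 20000 20000 20000 (by norm_num),
      pvWhileA_spec 10000 10000 10000 (by norm_num),
      pvWhileA_spec 5000 20000 5000 (by norm_num)]
  simp only [List.nil_append, List.foldl_append, foldl_add_replicate]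
  set k1 := pvIter 20000 20000 20 mR with hk1
  set k2 := pvIter 10000 10000 40 (mR - 20000 * k1) with hk2
  set k3 := pvIter 5000 20000 40 (mR - 20000 * k1 - 10000 * k2) with hk3
  have e1 : (k1 : Int) = max 0 (min 20 (mR / 20000)) := by
    rw [hk1]; unfold pvIter; split_ifs <;> push_cast <;> omega
  have e2 : (k2 : Int) = max 0 (min 40 ((mR - 20000 * k1) / 10000)) := by
    rw [hk2]; unfold pvIter; split_ifs <;> push_cast <;> omega
  have e3 : (k3 : Int) = if mR - 20000 * k1 - 10000 * k2 < 5000 then 0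
      else min 40 ((mR - 20000 * k1 - 10000 * k2 - 5000) / 20000 + 1) := by
    rw [hk3]; unfold pvIter; split_ifs <;> push_cast <;> omega
  rw [← e1, ← e2, ← e3]
  refine Prod.ext ?_ (Prod.ext ?_ (Prod.ext ?_ ?_)) <;> simp <;> ring

-- closed form of B's result (just unfolding the floordivs)
lemma B_closed (mR : Int) : CalculoBilletes_alt mR =
    (20000 * max 0 (min 20 (mR / 20000))
       + 10000 * max 0 (min 40 ((mR - 20000 * max 0 (min 20 (mR / 20000))) / 10000))
       + 5000 * max 0 (min 40 ((mR - 20000 * max 0 (min 20 (mR / 20000))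
            - 10000 * max 0 (min 40 ((mR - 20000 * max 0 (min 20 (mR / 20000))) / 10000))) / 5000)),
     max 0 (min 20 (mR / 20000)),
     max 0 (min 40 ((mR - 20000 * max 0 (min 20 (mR / 20000))) / 10000)),
     max 0 (min 40 ((mR - 20000 * max 0 (min 20 (mR / 20000))
          - 10000 * max 0 (min 40 ((mR - 20000 * max 0 (min 20 (mR / 20000))) / 10000))) / 5000))) := by
  simp only [CalculoBilletes_alt,
    PySem.Int.floordiv_eq_ediv_of_pos (by norm_num : (0:Int) < 20000),
    PySem.Int.floordiv_eq_ediv_of_pos (by norm_num : (0:Int) < 10000),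
    PySem.Int.floordiv_eq_ediv_of_pos (by norm_num : (0:Int) < 5000)]

-- ===== VERDICT (by name: the statements are the Claim_ definitions above) =====
theorem CalculoBilletes_spec : Claim_unchanged_CalculoBilletes := by
  intro mR _ hD
  show CalculoBilletes mR = CalculoBilletes_alt mR
  rw [A_closed, B_closed]
  simp only [D_CalculoBilletes] at hD
  have hc5 : (if mR - 20000 * max 0 (min 20 (mR / 20000))
          - 10000 * max 0 (min 40 ((mR - 20000 * max 0 (min 20 (mR / 20000))) / 10000)) < 5000 then (0:Int)
        else min 40 ((mR - 20000 * max 0 (min 20 (mR / 20000))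
          - 10000 * max 0 (min 40 ((mR - 20000 * max 0 (min 20 (mR / 20000))) / 10000)) - 5000) / 20000 + 1))
      = max 0 (min 40 ((mR - 20000 * max 0 (min 20 (mR / 20000))
          - 10000 * max 0 (min 40 ((mR - 20000 * max 0 (min 20 (mR / 20000))) / 10000))) / 5000)) := by
    split_ifs with h <;> omega
  rw [hc5]

theorem CalculoBilletes_changed : Claim_changed_CalculoBilletes := by
  unfold Claim_changed_CalculoBilletes; decide

theorem CalculoBilletes_tight : Claim_exact_CalculoBilletes := by
  intro mR _ hD heq
  rw [A_closed, B_closed] at heq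
  simp only [D_CalculoBilletes] at hD
  have h4 := congrArg (fun t : Int × Int × Int × Int => t.2.2.2) heq
  simp only at h4
  split_ifs at h4 with h <;> omega
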